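-- pv_equiv track=rewrite | github.com/BH1SCW/Leetcode-1 | HuaHua/contest/12/4.py | minimumMoves2
-- ===== SOURCE A (Python) =====
-- from typing import List
--
-- def minimumMoves2(arr: List[int]) -> int:
--     s = '_'.join(map(str, arr))
--     s = '_' + s + '_'
--     memo = {'_' : 0}
--     def is_palindrome(s):
--         s = s.split('_')
--         return s == s[::-1]
--     def dfs(s):
--         if s in memo:
--             return memo[s]
--         ans = len(s)
--         for i in range(len(s)):
--             if s[i] != '_': continue
--             for j in range(i + 2, len(s)):
--                 if s[j] != '_': continue
--                 if is_palindrome(s[i:j + 1]):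
--                     ans = min(dfs(s[:i] + s[j:]) + 1, ans)
--         memo[s] = ans
--         return ans
--     return dfs(s)
-- ===== SOURCE B (Python) =====
-- from typing import List
--
-- def minimumMoves2(arr: List[int]) -> int:
--     # Breadth-first search over array states: each level removes one
--     # palindromic subarray; the level at which the empty state appears
--     # is the minimum number of moves.
--     start = tuple(arr)
--     frontier = {start}
--     seen = {start}
--     moves = 0
--     while () not in frontier:
--         nxt = set()
--         for t in frontier:
--             for i in range(len(t)):
--                 for j in range(i, len(t)):
--                     seg = t[i:j + 1]
--                     if seg == seg[::-1]:
--                         u = t[:i] + t[j + 1:]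
--                         if u not in seen:
--                             seen.add(u)
--                             nxt.add(u)
--         frontier = nxt
--         moves += 1
--     return moves
-- ===== Notes on version B (the rewrite author's own statement) =====
-- stated objective: alternative
-- what changed: B replaces A's memoized depth-first minimization over '_'-joined string states with an iterative breadth-first search over integer-tuple states (frontier/seen sets, one level per move), returning the level at which the empty state is first reached.
-- intended difference: On the empty array A returns 2 (its seeded string '__' admits no move, so the initial bound len('__') is returned), while B returns 0, the intended answer: an empty array needs no moves. — e.g. on minimumMoves2([]): A returns 2, B returns 0
import Mathlib
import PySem

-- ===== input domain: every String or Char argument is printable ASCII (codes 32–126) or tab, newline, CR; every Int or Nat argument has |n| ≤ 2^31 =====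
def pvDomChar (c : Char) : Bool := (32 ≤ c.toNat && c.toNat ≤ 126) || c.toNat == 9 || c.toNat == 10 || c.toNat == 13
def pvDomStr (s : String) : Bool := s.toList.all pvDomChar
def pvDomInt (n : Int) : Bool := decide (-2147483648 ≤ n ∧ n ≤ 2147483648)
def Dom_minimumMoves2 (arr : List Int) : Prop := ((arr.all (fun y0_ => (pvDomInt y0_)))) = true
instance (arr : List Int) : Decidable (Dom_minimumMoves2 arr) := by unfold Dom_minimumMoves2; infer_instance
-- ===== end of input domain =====

-- B replaces A's memoized depth-first minimization over '_'-joined string states with an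
-- iterative breadth-first search over integer-list states (frontier/seen sets, one level
-- per move): the answer is the level at which the empty state first appears.

-- ===== PORT A =====
-- helper: A's `is_palindrome` (s.split('_'); s == s[::-1])
def pvIsPalinA (s : List Char) : Bool :=
  let parts := PySem.Chars.splitOn s ['_']
  parts == parts.reverse

-- A's `dfs`, with the memo dict threaded through; structural recursion on a fuel
-- counter that only makes the recursion total (every recursive call is on a strictly
-- shorter string, so fuel > len(s) is never exhausted).
def pvDfsA : Nat → List Char → PySem.Dict (List Char) Int → Int × PySem.Dict (List Char) Int
  | 0, _, memo => (0, memo)  -- unreachable for fuel > len s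
  | fuel + 1, s, memo =>
    match memo.get? s with
    | some v => (v, memo)
    | none =>
      -- ans = len(s); for i in range(len(s)): … for j in range(i+2, len(s)): …
      let r := (List.range s.length).foldl (fun acc (i : Nat) =>
          if s[i]? ≠ some '_' then acc else
          (List.range' (i + 2) (s.length - (i + 2))).foldl (fun acc (j : Nat) =>
            if s[j]? ≠ some '_' then acc else
            if pvIsPalinA (PySem.List.slice s (some (i : Int)) (some ((j : Int) + 1))) then
              let p := pvDfsA fuel
                (PySem.List.slice s none (some (i : Int)) ++ PySem.List.slice s (some (j : Int)) none)
                acc.2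
              (min (p.1 + 1) acc.1, p.2)
            else acc) acc) (PySem.List.len s, memo)
      (r.1, r.2.insert s r.1)

def minimumMoves2 (arr : List Int) : Int :=
  let s := PySem.Chars.join ['_'] (arr.map PySem.Int.toChars)
  let s := ['_'] ++ s ++ ['_']
  let memo : PySem.Dict (List Char) Int := PySem.Dict.empty.insert ['_'] 0
  (pvDfsA (s.length + 1) s memo).1

-- ===== PORT B =====
-- one BFS level: `for t in frontier: for i …: for j …:` collecting unseen successor
-- states into (nxt, seen); acc.1 is nxt, acc.2 is seen
def pvLevel (frontier : PySem.Set (List Int)) (seen : PySem.Set (List Int)) :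
    PySem.Set (List Int) × PySem.Set (List Int) :=
  frontier.foldl (fun acc t =>
    (List.range t.length).foldl (fun acc (i : Nat) =>
      (List.range' i (t.length - i)).foldl (fun acc (j : Nat) =>
        let seg := PySem.List.slice t (some (i : Int)) (some ((j : Int) + 1))
        if seg = seg.reverse then
          let u := PySem.List.slice t none (some (i : Int)) ++
                   PySem.List.slice t (some ((j : Int) + 1)) none
          if PySem.Set.contains acc.2 u then acc
          else (PySem.Set.add acc.1 u, PySem.Set.add acc.2 u)
        else acc) acc) acc) (PySem.Set.empty, seen)

-- the `while () not in frontier:` loop; fuel only makes it total (the empty state is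
-- reached within len(arr) levels, so fuel = len(arr)+1 is never exhausted)
def pvBFS : Nat → PySem.Set (List Int) → PySem.Set (List Int) → Int → Int
  | 0, _, _, moves => moves  -- unreachable
  | fuel + 1, frontier, seen, moves =>
    if PySem.Set.contains frontier [] then moves
    else pvBFS fuel (pvLevel frontier seen).1 (pvLevel frontier seen).2 (moves + 1)

def minimumMoves2_alt (arr : List Int) : Int :=
  pvBFS (arr.length + 1) (PySem.Set.ofList [arr]) (PySem.Set.ofList [arr]) 0

-- ===== PRECONDITION & SPEC =====
-- On the empty array A returns 2 (its seeded string '__' admits no move and falls back to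
-- the initial bound len(s)), while B returns the intended answer 0: no moves are needed.
def D_minimumMoves2 (arr : List Int) : Prop := arr = []
instance (arr : List Int) : Decidable (D_minimumMoves2 arr) := by unfold D_minimumMoves2; infer_instance

def Spec_minimumMoves2 (arr : List Int) (out : Int) : Prop := ¬ D_minimumMoves2 arr → out = minimumMoves2_alt arr
instance (arr : List Int) (out : Int) : Decidable (Spec_minimumMoves2 arr out) := by unfold Spec_minimumMoves2; infer_instance

def pvDiffWitness_minimumMoves2 : List Int := []
def pvDiffWitnessOut_minimumMoves2 : Int × Int := (2, 0)

-- ===== CLAIM (what is proved, stated in full; the proofs are below) =====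
def Claim_unchanged_minimumMoves2 : Prop := ∀ (arr : List Int), Dom_minimumMoves2 arr → Spec_minimumMoves2 arr (minimumMoves2 arr)
def Claim_changed_minimumMoves2 : Prop := Dom_minimumMoves2 (pvDiffWitness_minimumMoves2) ∧ D_minimumMoves2 (pvDiffWitness_minimumMoves2) ∧ minimumMoves2 (pvDiffWitness_minimumMoves2) = pvDiffWitnessOut_minimumMoves2.1 ∧ minimumMoves2_alt (pvDiffWitness_minimumMoves2) = pvDiffWitnessOut_minimumMoves2.2 ∧ pvDiffWitnessOut_minimumMoves2.1 ≠ pvDiffWitnessOut_minimumMoves2.2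
def Claim_exact_minimumMoves2 : Prop := ∀ (arr : List Int), Dom_minimumMoves2 arr → D_minimumMoves2 arr → minimumMoves2 arr ≠ minimumMoves2_alt arr

-- ===== LEMMAS AND PROOFS =====

-- ---------- pure (memo-free) companions of the two searches ----------
def pvFA : Nat → List Char → Int
  | 0, _ => 0
  | fuel + 1, s =>
    if s = ['_'] then 0 else
    (List.range s.length).foldl (fun a (i : Nat) =>
      if s[i]? ≠ some '_' then a else
      (List.range' (i + 2) (s.length - (i + 2))).foldl (fun a (j : Nat) =>
        if s[j]? ≠ some '_' then a else
        if pvIsPalinA (PySem.List.slice s (some (i : Int)) (some ((j : Int) + 1))) then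
          min (pvFA fuel (PySem.List.slice s none (some (i : Int)) ++ PySem.List.slice s (some (j : Int)) none) + 1) a
        else a) a) (PySem.List.len s)

def pvFB : Nat → List Int → Int
  | 0, _ => 0
  | fuel + 1, t =>
    if t = [] then 0 else
    (List.range t.length).foldl (fun a (i : Nat) =>
      (List.range' i (t.length - i)).foldl (fun a (j : Nat) =>
        let seg := PySem.List.slice t (some (i : Int)) (some ((j : Int) + 1))
        if seg = seg.reverse then
          min a (1 + pvFB fuel (PySem.List.slice t none (some (i : Int)) ++ PySem.List.slice t (some ((j : Int) + 1)) none))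
        else a) a) (PySem.List.len t)

def pvCanonA (s : List Char) : Int := pvFA (s.length + 1) s
def pvCanonB (t : List Int) : Int := pvFB (t.length + 1) t

def pvValidA (m : PySem.Dict (List Char) Int) : Prop :=
  m.get? ['_'] = some 0 ∧ ∀ k v, m.get? k = some v → v = pvCanonA k

-- token-level encoding used by A
def pvTok (t : List Char) : List Char := t ++ ['_']
def pvE (ts : List (List Char)) : List Char := '_' :: ts.flatMap pvTok
def pvPos (ts : List (List Char)) (g : Nat) : Nat := g + ((ts.take g).map List.length).sum


-- ---------- generic fold lemmas ----------
theorem pvFoldState {σ M : Type} (P : M → Prop) (f : Int × M → σ → Int × M) (g : Int → σ → Int) :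
    ∀ (l : List σ), (∀ a m x, x ∈ l → P m → (f (a, m) x).1 = g a x ∧ P (f (a, m) x).2) →
    ∀ a m, P m → (l.foldl f (a, m)).1 = l.foldl g a ∧ P (l.foldl f (a, m)).2 := by
  intro l
  induction l with
  | nil => intro _ a m hm; exact ⟨rfl, hm⟩
  | cons x l ih =>
    intro H a m hm
    have hx := H a m x (by simp) hm
    have hfx : f (a, m) x = (g a x, (f (a, m) x).2) := by rw [← hx.1]
    simp only [List.foldl_cons]
    rw [hfx]
    exact ih (fun a m y hy hm => H a m y (by simp [hy]) hm) (g a x) _ hx.2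

theorem pvFoldLe {σ : Type} (F : Int → σ → Int) (H1 : ∀ a x, F a x ≤ a) :
    ∀ (l : List σ) (a : Int), l.foldl F a ≤ a := by
  intro l
  induction l with
  | nil => intro a; exact le_refl a
  | cons x l ih => intro a; exact le_trans (ih (F a x)) (H1 a x)

theorem pvFoldMin {σ : Type} (F : Int → σ → Int) (H2 : ∀ x y p, F (min x y) p = min x (F y p)) :
    ∀ (l : List σ) (x y : Int), l.foldl F (min x y) = min x (l.foldl F y) := by
  intro l
  induction l with
  | nil => intro x y; rfl
  | cons p l ih => intro x y; simp only [List.foldl_cons]; rw [H2, ih]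

theorem pvFoldThrough {σ : Type} (F : Int → σ → Int) (H1 : ∀ a x, F a x ≤ a)
    (p : σ) (K : Int) (hK : ∀ a, F a p ≤ K) :
    ∀ (l : List σ) (a : Int), p ∈ l → l.foldl F a ≤ K := by
  intro l
  induction l with
  | nil => intro a h; cases h
  | cons q l ih =>
    intro a hmem
    rcases List.mem_cons.mp hmem with h | h
    · subst h
      simp only [List.foldl_cons]
      exact le_trans (pvFoldLe F H1 l (F a p)) (hK a)
    · exact ih (F a q) h

theorem pvFoldLB {σ : Type} (F : Int → σ → Int) (w : Int) :
    ∀ (l : List σ), (∀ a x, x ∈ l → w ≤ a → w ≤ F a x) →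
    ∀ a, w ≤ a → w ≤ l.foldl F a := by
  intro l
  induction l with
  | nil => intro _ a ha; exact ha
  | cons x l ih =>
    intro H a ha
    exact ih (fun a y hy h => H a y (by simp [hy]) h) (F a x) (H a x (by simp) ha)

theorem pvFoldlFoldl {α β γ : Type} (f : β → α → β) (g : γ → List α) :
    ∀ (l : List γ) (a : β), l.foldl (fun acc t => (g t).foldl f acc) a = (l.flatMap g).foldl f a := by
  intro l
  induction l with
  | nil => intro a; rfl
  | cons x l ih =>
    intro a
    simp only [List.foldl_cons, List.flatMap_cons, List.foldl_append]
    exact ih _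

-- ---------- slices with Nat endpoints are take/drop ----------
theorem pvSlice_to {α : Type} (xs : List α) (i : Nat) :
    PySem.List.slice xs none (some (i : Int)) = xs.take i := by
  rw [PySem.List.slice_to xs (by exact_mod_cast Int.natCast_nonneg i)]
  simp

theorem pvSlice_from {α : Type} (xs : List α) (j : Nat) :
    PySem.List.slice xs (some (j : Int)) none = xs.drop j := by
  rw [PySem.List.slice_from xs (by exact_mod_cast Int.natCast_nonneg j)]
  simp

theorem pvSlice_seg {α : Type} (xs : List α) (i j : Nat) :
    PySem.List.slice xs (some (i : Int)) (some ((j : Int) + 1)) = (xs.drop i).take (j + 1 - i) := by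
  have h : ((j : Int) + 1) = ((j + 1 : Nat) : Int) := by push_cast; ring
  rw [h, PySem.List.slice_natCast]

theorem pvSlice_from' {α : Type} (xs : List α) (j : Nat) :
    PySem.List.slice xs (some ((j : Int) + 1)) none = xs.drop (j + 1) := by
  rw [show ((j : Int) + 1) = ((j + 1 : Nat) : Int) from by push_cast; ring, pvSlice_from]

-- ---------- fuel irrelevance for the pure companions ----------
theorem pvFA_fuel : ∀ (n : Nat) (s : List Char), s.length ≤ n →
    ∀ f1 f2, s.length < f1 → s.length < f2 → pvFA f1 s = pvFA f2 s := by
  intro n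
  induction n with
  | zero =>
    intro s hs f1 f2 h1 h2
    have : s = [] := List.eq_nil_of_length_eq_zero (Nat.le_zero.mp hs)
    subst this
    cases f1 with
    | zero => omega
    | succ f1 =>
      cases f2 with
      | zero => omega
      | succ f2 => simp [pvFA]
  | succ n ih =>
    intro s hs f1 f2 h1 h2
    cases f1 with
    | zero => omega
    | succ f1 =>
      cases f2 with
      | zero => omega
      | succ f2 =>
        simp only [pvFA]
        by_cases hone : s = ['_']
        · simp [hone]
        · rw [if_neg hone, if_neg hone]
          apply PySem.List.foldl_congr_mem
          intro a i hi
          have hi' : i < s.length := List.mem_range.mp hi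
          by_cases hci : s[i]? ≠ some '_'
          · rw [if_pos hci, if_pos hci]
          · rw [if_neg hci, if_neg hci]
            apply PySem.List.foldl_congr_mem
            intro a j hj
            have hj' : i + 2 ≤ j ∧ j < s.length := by
              have := List.mem_range'_1.mp hj
              omega
            by_cases hcj : s[j]? ≠ some '_'
            · rw [if_pos hcj, if_pos hcj]
            · rw [if_neg hcj, if_neg hcj]
              by_cases hp : pvIsPalinA (PySem.List.slice s (some (i : Int)) (some ((j : Int) + 1))) = true
              · rw [if_pos hp, if_pos hp]
                have hlen : (PySem.List.slice s none (some (i : Int)) ++ PySem.List.slice s (some (j : Int)) none).length ≤ n ∧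
                    (PySem.List.slice s none (some (i : Int)) ++ PySem.List.slice s (some (j : Int)) none).length < f1 ∧
                    (PySem.List.slice s none (some (i : Int)) ++ PySem.List.slice s (some (j : Int)) none).length < f2 := by
                  rw [pvSlice_to, pvSlice_from]
                  simp only [List.length_append, List.length_take, List.length_drop]
                  omega
                rw [ih _ hlen.1 f1 f2 hlen.2.1 hlen.2.2]
              · rw [if_neg hp, if_neg hp]

theorem pvFB_fuel : ∀ (n : Nat) (t : List Int), t.length ≤ n →
    ∀ f1 f2, t.length < f1 → t.length < f2 → pvFB f1 t = pvFB f2 t := by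
  intro n
  induction n with
  | zero =>
    intro t ht f1 f2 h1 h2
    have : t = [] := List.eq_nil_of_length_eq_zero (Nat.le_zero.mp ht)
    subst this
    cases f1 with
    | zero => omega
    | succ f1 =>
      cases f2 with
      | zero => omega
      | succ f2 => simp [pvFB]
  | succ n ih =>
    intro t ht f1 f2 h1 h2
    cases f1 with
    | zero => omega
    | succ f1 =>
      cases f2 with
      | zero => omega
      | succ f2 =>
        simp only [pvFB]
        by_cases hnil : t = []
        · simp [hnil]
        · rw [if_neg hnil, if_neg hnil]
          apply PySem.List.foldl_congr_mem
          intro a i hi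
          have hi' : i < t.length := List.mem_range.mp hi
          apply PySem.List.foldl_congr_mem
          intro a j hj
          have hj' : i ≤ j ∧ j < t.length := by
            have := List.mem_range'_1.mp hj
            omega
          by_cases hp : PySem.List.slice t (some (i : Int)) (some ((j : Int) + 1)) =
              (PySem.List.slice t (some (i : Int)) (some ((j : Int) + 1))).reverse
          · rw [if_pos hp, if_pos hp]
            have hlen : (PySem.List.slice t none (some (i : Int)) ++ PySem.List.slice t (some ((j : Int) + 1)) none).length ≤ n ∧
                (PySem.List.slice t none (some (i : Int)) ++ PySem.List.slice t (some ((j : Int) + 1)) none).length < f1 ∧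
                (PySem.List.slice t none (some (i : Int)) ++ PySem.List.slice t (some ((j : Int) + 1)) none).length < f2 := by
              rw [pvSlice_to, pvSlice_from']
              simp only [List.length_append, List.length_take, List.length_drop]
              omega
            rw [ih _ hlen.1 f1 f2 hlen.2.1 hlen.2.2]
          · rw [if_neg hp, if_neg hp]


-- ---------- the memoised port A computes its pure companion ----------
theorem pvDfsA_spec : ∀ (fuel : Nat) (s : List Char) (m : PySem.Dict (List Char) Int),
    s.length < fuel → pvValidA m →
    (pvDfsA fuel s m).1 = pvCanonA s ∧ pvValidA (pvDfsA fuel s m).2 := by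
  intro fuel
  induction fuel with
  | zero => intro s m h; omega
  | succ f ih =>
    intro s m hlen hm
    rw [pvDfsA]
    cases hg : m.get? s with
    | some v =>
      exact ⟨(hm.2 s v hg), hm⟩
    | none =>
      have hs : s ≠ ['_'] := by
        intro h
        rw [h, hm.1] at hg
        cases hg
      have main := pvFoldState (σ := Nat) (M := PySem.Dict (List Char) Int) pvValidA
        (fun acc (i : Nat) =>
          if s[i]? ≠ some '_' then acc else
          (List.range' (i + 2) (s.length - (i + 2))).foldl (fun acc (j : Nat) =>
            if s[j]? ≠ some '_' then acc else
            if pvIsPalinA (PySem.List.slice s (some (i : Int)) (some ((j : Int) + 1))) then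
              let p := pvDfsA f
                (PySem.List.slice s none (some (i : Int)) ++ PySem.List.slice s (some (j : Int)) none)
                acc.2
              (min (p.1 + 1) acc.1, p.2)
            else acc) acc)
        (fun a (i : Nat) =>
          if s[i]? ≠ some '_' then a else
          (List.range' (i + 2) (s.length - (i + 2))).foldl (fun a (j : Nat) =>
            if s[j]? ≠ some '_' then a else
            if pvIsPalinA (PySem.List.slice s (some (i : Int)) (some ((j : Int) + 1))) then
              min (pvFA f (PySem.List.slice s none (some (i : Int)) ++ PySem.List.slice s (some (j : Int)) none) + 1) a
            else a) a)
        (List.range s.length)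
        (by
        intro a m' i himem hm'
        beta_reduce
        have hi' : i < s.length := List.mem_range.mp himem
        by_cases hci : s[i]? ≠ some '_'
        · rw [if_pos hci, if_pos hci]
          exact ⟨rfl, hm'⟩
        · rw [if_neg hci, if_neg hci]
          exact pvFoldState (σ := Nat) (M := PySem.Dict (List Char) Int) pvValidA
            _ _ (List.range' (i + 2) (s.length - (i + 2)))
            (by
              intro a m'' j hjmem hm''
              have hj' : i + 2 ≤ j ∧ j < s.length := by
                have := List.mem_range'_1.mp hjmem
                omega
              by_cases hcj : s[j]? ≠ some '_'
              · rw [if_pos hcj, if_pos hcj]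
                exact ⟨rfl, hm''⟩
              · rw [if_neg hcj, if_neg hcj]
                by_cases hp : pvIsPalinA (PySem.List.slice s (some (i : Int)) (some ((j : Int) + 1))) = true
                · rw [if_pos hp, if_pos hp]
                  have hlen' : (PySem.List.slice s none (some (i : Int)) ++ PySem.List.slice s (some (j : Int)) none).length < f := by
                    rw [pvSlice_to, pvSlice_from]
                    simp only [List.length_append, List.length_take, List.length_drop]
                    omega
                  have hrec := ih _ m'' hlen' hm''
                  refine ⟨?_, hrec.2⟩
                  simp only []
                  rw [hrec.1]
                  unfold pvCanonA
                  rw [pvFA_fuel _ _ (le_refl _) _ f (Nat.lt_succ_self _) hlen']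
                · rw [if_neg hp, if_neg hp]
                  exact ⟨rfl, hm''⟩)
            a m' hm')
        (PySem.List.len s) m hm
      have hpure : (List.range s.length).foldl
            (fun a (i : Nat) =>
              if s[i]? ≠ some '_' then a else
              (List.range' (i + 2) (s.length - (i + 2))).foldl (fun a (j : Nat) =>
                if s[j]? ≠ some '_' then a else
                if pvIsPalinA (PySem.List.slice s (some (i : Int)) (some ((j : Int) + 1))) then
                  min (pvFA f (PySem.List.slice s none (some (i : Int)) ++ PySem.List.slice s (some (j : Int)) none) + 1) a
                else a) a)
            (PySem.List.len s) = pvFA (f + 1) s := by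
          rw [pvFA, if_neg hs]
      rw [hpure] at main
      have hcanon : pvFA (f + 1) s = pvCanonA s := by
        rw [pvFA_fuel s.length s (le_refl _) (f + 1) (s.length + 1) hlen (Nat.lt_succ_self _)]
        rfl
      refine ⟨main.1.trans hcanon, ?_, ?_⟩
      · rw [PySem.Dict.get?_insert_of_ne _ _ (by intro h; exact hs h.symm)]
        exact main.2.1
      · intro k v hkv
        by_cases hks : k = s
        · subst hks
          rw [PySem.Dict.get?_insert_self] at hkv
          cases hkv
          exact main.1.trans hcanon
        · rw [PySem.Dict.get?_insert_of_ne _ _ hks] at hkv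
          exact main.2.2 k v hkv

theorem pvA_top (arr : List Int) :
    minimumMoves2 arr = pvCanonA (['_'] ++ PySem.Chars.join ['_'] (arr.map PySem.Int.toChars) ++ ['_']) := by
  have hvalid : pvValidA (PySem.Dict.empty.insert ['_'] 0) := by
    constructor
    · exact PySem.Dict.get?_insert_self _ _ _
    · intro k v hkv
      by_cases hk : k = ['_']
      · subst hk
        rw [PySem.Dict.get?_insert_self] at hkv
        cases hkv
        rfl
      · rw [PySem.Dict.get?_insert_of_ne _ _ hk, PySem.Dict.get?_empty] at hkv
        cases hkv
  exact (pvDfsA_spec _ _ _ (Nat.lt_succ_self _) hvalid).1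


-- ---------- str(n): decimal digits ----------
def pvDig (n : Nat) : List Char :=
  if _h : n < 10 then [Nat.digitChar n]
  else pvDig (n / 10) ++ [Nat.digitChar (n % 10)]
decreasing_by exact Nat.div_lt_self (by omega) (by omega)

theorem pvDig_toDigitsCore : ∀ (fuel n : Nat) (l : List Char), n ≤ fuel →
    Nat.toDigitsCore 10 (fuel + 1) n l = pvDig n ++ l := by
  intro fuel
  induction fuel with
  | zero =>
    intro n l h
    have hn : n = 0 := Nat.le_zero.mp h
    subst hn
    rw [pvDig]
    simp [Nat.toDigitsCore]
  | succ fuel ih =>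
    intro n l h
    rw [Nat.toDigitsCore]
    by_cases h10 : n < 10
    · have : n / 10 = 0 := Nat.div_eq_of_lt h10
      rw [if_pos this]
      rw [pvDig, dif_pos h10, Nat.mod_eq_of_lt h10]
      rfl
    · have hne : ¬ (n / 10 = 0) := by
        intro hz
        have := Nat.div_eq_of_lt (by omega : n < 10)
        omega
      rw [if_neg hne]
      have hle : n / 10 ≤ fuel := by
        have := Nat.div_lt_self (by omega : 0 < n) (by omega : 1 < 10)
        omega
      rw [ih (n / 10) (Nat.digitChar (n % 10) :: l) hle]
      conv_rhs => rw [pvDig]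
      rw [dif_neg h10]
      simp

theorem pvToDigits_eq (n : Nat) : Nat.toDigits 10 n = pvDig n := by
  unfold Nat.toDigits
  rw [pvDig_toDigitsCore n n [] (le_refl n)]
  simp

theorem pvDigitChar_toNat (k : Nat) (h : k < 10) : (Nat.digitChar k).toNat = 48 + k := by
  interval_cases k <;> rfl

theorem pvDig_chars : ∀ (n : Nat), ∀ c ∈ pvDig n, 48 ≤ c.toNat ∧ c.toNat ≤ 57 := by
  intro n
  induction n using pvDig.induct with
  | case1 n h =>
    intro c hc
    rw [pvDig, dif_pos h] at hc
    rcases List.mem_singleton.mp hc with rfl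
    rw [pvDigitChar_toNat n h]
    omega
  | case2 n h ih =>
    intro c hc
    rw [pvDig, dif_neg h] at hc
    rcases List.mem_append.mp hc with hc | hc
    · exact ih c hc
    · rcases List.mem_singleton.mp hc with rfl
      rw [pvDigitChar_toNat _ (Nat.mod_lt n (by omega))]
      have := Nat.mod_lt n (show 0 < 10 by omega)
      omega

theorem pvDig_ne_nil (n : Nat) : pvDig n ≠ [] := by
  rw [pvDig]
  split
  · simp
  · simp

def pvVal (l : List Char) : Nat := l.foldl (fun a c => a * 10 + (c.toNat - 48)) 0

theorem pvVal_pvDig : ∀ (n : Nat), pvVal (pvDig n) = n := by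
  intro n
  induction n using pvDig.induct with
  | case1 n h =>
    rw [pvDig, dif_pos h]
    simp [pvVal, pvDigitChar_toNat n h]
  | case2 n h ih =>
    rw [pvDig, dif_neg h]
    unfold pvVal
    rw [List.foldl_append]
    unfold pvVal at ih
    rw [ih]
    simp only [List.foldl_cons, List.foldl_nil]
    rw [pvDigitChar_toNat _ (Nat.mod_lt n (by omega))]
    omega

theorem pvDig_inj {a b : Nat} (h : pvDig a = pvDig b) : a = b := by
  have := pvVal_pvDig a
  rw [h, pvVal_pvDig] at this
  omega

theorem pvToChars_no_underscore (n : Int) : ∀ c ∈ PySem.Int.toChars n, c ≠ '_' := by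
  unfold PySem.Int.toChars
  split
  · intro c hc
    rcases List.mem_cons.mp hc with rfl | hc
    · decide
    · rw [pvToDigits_eq] at hc
      have := pvDig_chars _ c hc
      intro h
      subst h
      simp at this
  · intro c hc
    rw [pvToDigits_eq] at hc
    have := pvDig_chars _ c hc
    intro h
    subst h
    simp at this

theorem pvToChars_ne_nil (n : Int) : PySem.Int.toChars n ≠ [] := by
  unfold PySem.Int.toChars
  split
  · simp
  · rw [pvToDigits_eq]; exact pvDig_ne_nil _

theorem pvToChars_inj : Function.Injective PySem.Int.toChars := by
  intro a b h
  unfold PySem.Int.toChars at h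
  by_cases ha : a < 0 <;> by_cases hb : b < 0
  · rw [if_pos ha, if_pos hb, pvToDigits_eq, pvToDigits_eq] at h
    injection h with _ h2
    have := pvDig_inj h2
    omega
  · exfalso
    rw [if_pos ha, if_neg hb, pvToDigits_eq, pvToDigits_eq] at h
    rcases List.exists_cons_of_ne_nil (pvDig_ne_nil b.toNat) with ⟨c, t, hct⟩
    rw [hct] at h
    injection h with h1 _
    have hm : c ∈ pvDig b.toNat := by rw [hct]; simp
    have := pvDig_chars _ c hm
    rw [← h1] at this
    simp at this
  · exfalso
    rw [if_neg ha, if_pos hb, pvToDigits_eq, pvToDigits_eq] at h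
    rcases List.exists_cons_of_ne_nil (pvDig_ne_nil a.toNat) with ⟨c, t, hct⟩
    rw [hct] at h
    injection h with h1 _
    have hm : c ∈ pvDig a.toNat := by rw [hct]; simp
    have := pvDig_chars _ c hm
    rw [h1] at this
    simp at this
  · rw [if_neg ha, if_neg hb, pvToDigits_eq, pvToDigits_eq] at h
    have := pvDig_inj h
    omega

-- ---------- s.split('_') ----------
def pvSplit : List Char → List Char → List (List Char)
  | [], cur => [cur.reverse]
  | c :: rest, cur => if c = '_' then cur.reverse :: pvSplit rest [] else pvSplit rest (c :: cur)

theorem pvSplit_go : ∀ (fuel : Nat) (l cur acc : _), l.length < fuel →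
    PySem.Chars.splitOn.go ['_'] fuel l cur acc = acc.reverse ++ pvSplit l cur := by
  intro fuel
  induction fuel with
  | zero => intro l cur acc h; omega
  | succ fuel ih =>
    intro l cur acc h
    cases l with
    | nil =>
      rw [PySem.Chars.splitOn.go, pvSplit]
      · simp
      · omega
    | cons c rest =>
      by_cases hc : c = '_'
      · subst hc
        have hstep : PySem.Chars.splitOn.go ['_'] (fuel + 1) ('_' :: rest) cur acc =
            PySem.Chars.splitOn.go ['_'] fuel rest [] (cur.reverse :: acc) := by
          rw [PySem.Chars.splitOn.go]
          have hpre : List.isPrefixOf ['_'] ('_' :: rest) = true := by simp [List.isPrefixOf]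
          rw [hpre]
          simp
        rw [hstep, ih rest [] (cur.reverse :: acc) (by simp at h; omega)]
        rw [pvSplit, if_pos rfl]
        simp
      · have hstep : PySem.Chars.splitOn.go ['_'] (fuel + 1) (c :: rest) cur acc =
            PySem.Chars.splitOn.go ['_'] fuel rest (c :: cur) acc := by
          rw [PySem.Chars.splitOn.go]
          have hpre : List.isPrefixOf ['_'] (c :: rest) = false := by
            simp [List.isPrefixOf]
            intro hh; exact absurd hh.symm hc
          rw [hpre]
          simp
        rw [hstep, ih rest (c :: cur) acc (by simp at h; omega)]
        rw [pvSplit, if_neg hc]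

theorem pvSplitOn_eq (s : List Char) : PySem.Chars.splitOn s ['_'] = pvSplit s [] := by
  unfold PySem.Chars.splitOn
  rw [pvSplit_go (s.length + 1) s [] [] (Nat.lt_succ_self _)]
  simp

theorem pvSplit_token : ∀ (t : List Char), ('_' ∉ t) → ∀ rest cur,
    pvSplit (t ++ rest) cur = pvSplit rest (t.reverse ++ cur) := by
  intro t
  induction t with
  | nil => intro _ rest cur; simp
  | cons c t ih =>
    intro hfree rest cur
    have hc : c ≠ '_' := by intro h; exact hfree (h ▸ List.mem_cons_self)
    have hf : '_' ∉ t := fun h => hfree (List.mem_cons_of_mem c h)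
    simp only [List.cons_append, pvSplit]
    rw [if_neg hc, ih hf rest (c :: cur)]
    congr 1
    simp

theorem pvSplit_flat : ∀ (us : List (List Char)), (∀ t ∈ us, '_' ∉ t) →
    pvSplit (us.flatMap pvTok) [] = us ++ [[]] := by
  intro us
  induction us with
  | nil => intro _; rfl
  | cons u us ih =>
    intro hfree
    have hu : '_' ∉ u := hfree u List.mem_cons_self
    have hus : ∀ t ∈ us, '_' ∉ t := fun t ht => hfree t (List.mem_cons_of_mem u ht)
    have : (u :: us).flatMap pvTok = u ++ ('_' :: us.flatMap pvTok) := by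
      simp [pvTok, List.flatMap_cons]
    rw [this, pvSplit_token u hu]
    simp only [pvSplit]
    rw [ih hus]
    simp

theorem pvSplitOn_E (us : List (List Char)) (h : ∀ t ∈ us, '_' ∉ t) :
    PySem.Chars.splitOn (pvE us) ['_'] = [] :: us ++ [[]] := by
  rw [pvSplitOn_eq]
  unfold pvE
  simp only [pvSplit]
  rw [pvSplit_flat us h]
  simp

theorem pvIsPalinA_E_iff (us : List (List Char)) (h : ∀ t ∈ us, '_' ∉ t) :
    pvIsPalinA (pvE us) = true ↔ us = us.reverse := by
  unfold pvIsPalinA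
  rw [pvSplitOn_E us h]
  simp only [beq_iff_eq]
  have hrev : (([] : List Char) :: us ++ [([] : List Char)]).reverse = [] :: us.reverse ++ [[]] := by
    simp
  rw [hrev]
  constructor
  · intro heq
    injection heq with _ h2
    exact (List.append_left_inj [[]]).mp h2
  · intro heq
    rw [← heq]


-- ---------- structure of the encoded string ----------
theorem pvE_cons (t : List Char) (ts : List (List Char)) :
    pvE (t :: ts) = '_' :: (t ++ pvE ts) := by
  simp [pvE, pvTok, List.flatMap_cons]

theorem pvE_end : ∀ (us : List (List Char)), ∃ q,
    '_' :: us.flatMap pvTok = q ++ ['_'] ∧ q.length = us.length + (us.map List.length).sum := by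
  intro us
  induction us with
  | nil => exact ⟨[], by simp⟩
  | cons u us ih =>
    rcases ih with ⟨q, hq, hl⟩
    refine ⟨'_' :: u ++ q, ?_, ?_⟩
    · rw [List.flatMap_cons]
      show '_' :: ((u ++ ['_']) ++ us.flatMap pvTok) = _
      rw [show (u ++ ['_']) ++ us.flatMap pvTok = u ++ ('_' :: us.flatMap pvTok) by simp, hq]
      simp
    · simp at hl ⊢
      omega

theorem pvE_split (ts : List (List Char)) (g : Nat) (hg : g ≤ ts.length) : ∃ q,
    pvE ts = q ++ pvE (ts.drop g) ∧ q.length = pvPos ts g ∧ pvE (ts.take g) = q ++ ['_'] := by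
  rcases pvE_end (ts.take g) with ⟨q, hq, hl⟩
  refine ⟨q, ?_, ?_, hq⟩
  · show '_' :: ts.flatMap pvTok = _
    conv_lhs => rw [← List.take_append_drop g ts]
    rw [List.flatMap_append]
    show '_' :: ((ts.take g).flatMap pvTok ++ (ts.drop g).flatMap pvTok) = _
    rw [show '_' :: ((ts.take g).flatMap pvTok ++ (ts.drop g).flatMap pvTok) =
        ('_' :: (ts.take g).flatMap pvTok) ++ (ts.drop g).flatMap pvTok from rfl, hq]
    show (q ++ ['_']) ++ (ts.drop g).flatMap pvTok = q ++ pvE (ts.drop g)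
    simp [pvE]
  · rw [hl]
    unfold pvPos
    rw [List.length_take, min_eq_left hg]

theorem pvPos_add (ts : List (List Char)) (g k : Nat) :
    pvPos ts (g + k) = pvPos ts g + (pvPos (ts.drop g) k - k) + k := by
  unfold pvPos
  rw [List.take_add, List.map_append, List.sum_append]
  omega

theorem pvSum_ge : ∀ (us : List (List Char)) (k : Nat), (∀ t ∈ us, t ≠ []) → k ≤ us.length →
    k ≤ ((us.take k).map List.length).sum := by
  intro us
  induction us with
  | nil => intro k _ hk; simp at hk; omega
  | cons u us ih =>
    intro k hne hk
    cases k with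
    | zero => omega
    | succ k =>
      rw [List.take_succ_cons, List.map_cons, List.sum_cons]
      have h1 : 1 ≤ u.length := by
        have := hne u List.mem_cons_self
        cases u with
        | nil => exact absurd rfl this
        | cons a l => simp
      have := ih k (fun t ht => hne t (List.mem_cons_of_mem u ht)) (by simp at hk; omega)
      omega

theorem pvPos_ge (us : List (List Char)) (k : Nat) (hne : ∀ t ∈ us, t ≠ []) (hk : k ≤ us.length) :
    2 * k ≤ pvPos us k := by
  have := pvSum_ge us k hne hk
  unfold pvPos
  omega

theorem pvPos_mono (ts : List (List Char)) {g g' : Nat} (h : g ≤ g') : pvPos ts g ≤ pvPos ts g' := by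
  have h2 := pvPos_add ts g (g' - g)
  rw [show g + (g' - g) = g' from by omega] at h2
  omega

theorem pvPos_gap (ts : List (List Char)) {g g' : Nat} (hne : ∀ t ∈ ts, t ≠ [])
    (h : g < g') (h' : g' ≤ ts.length) : pvPos ts g + 2 ≤ pvPos ts g' := by
  have h2 := pvPos_add ts g (g' - g)
  rw [show g + (g' - g) = g' from by omega] at h2
  have h3 := pvPos_ge (ts.drop g) (g' - g)
    (fun t ht => hne t (List.mem_of_mem_drop ht)) (by rw [List.length_drop]; omega)
  omega

theorem pvE_len (ts : List (List Char)) : (pvE ts).length = pvPos ts ts.length + 1 := by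
  rcases pvE_split ts ts.length (le_refl _) with ⟨q, h1, h2, _⟩
  rw [h1, List.drop_length]
  show (q ++ ['_']).length = _
  rw [List.length_append, h2]
  rfl

-- the '_' positions of the encoded string
theorem pvFilter_und : ∀ (ts : List (List Char)), (∀ t ∈ ts, '_' ∉ t) →
    (List.range (pvE ts).length).filter (fun p => decide ((pvE ts)[p]? = some '_')) =
      (List.range (ts.length + 1)).map (pvPos ts) := by
  intro ts
  induction ts with
  | nil => intro _; rfl
  | cons t ts ih =>
    intro hfree
    have ht : '_' ∉ t := hfree t List.mem_cons_self
    have hts : ∀ u ∈ ts, '_' ∉ u := fun u hu => hfree u (List.mem_cons_of_mem t hu)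
    have hlen : (pvE (t :: ts)).length = (t.length + (pvE ts).length) + 1 := by
      rw [pvE_cons]
      simp only [List.length_cons, List.length_append]
    rw [hlen, List.range_succ_eq_map]
    rw [List.filter_cons]
    have h0 : decide ((pvE (t :: ts))[0]? = some '_') = true := by
      rw [pvE_cons]
      simp
    rw [h0]
    simp only [List.filter_map]
    have hpred : ∀ p : Nat, ((fun p => decide ((pvE (t :: ts))[p]? = some '_')) ∘ Nat.succ) p =
        decide ((t ++ pvE ts)[p]? = some '_') := by
      intro p
      simp only [Function.comp]
      rw [pvE_cons]
      simp
    rw [List.filter_congr (fun p _ => hpred p)]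
    -- split the index range at the end of the token t
    rw [List.range_add, List.filter_append]
    have hfirst : (List.range t.length).filter (fun p => decide ((t ++ pvE ts)[p]? = some '_')) = [] := by
      rw [List.filter_eq_nil_iff]
      intro p hp
      have hp' : p < t.length := List.mem_range.mp hp
      rw [List.getElem?_append_left hp']
      simp only [decide_eq_true_eq]
      intro hc
      have : '_' ∈ t := by
        have := List.getElem?_eq_some_iff.mp hc
        rcases this with ⟨hlt, hEq⟩
        rw [← hEq]
        exact List.getElem_mem _
      exact ht this
    rw [hfirst]
    simp only [List.nil_append, List.filter_map]
    have hpred2 : ∀ p : Nat, ((fun p => decide ((t ++ pvE ts)[p]? = some '_')) ∘ (t.length + ·)) p =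
        decide ((pvE ts)[p]? = some '_') := by
      intro p
      simp only [Function.comp]
      rw [List.getElem?_append_right (by omega)]
      simp
    rw [List.filter_congr (fun p _ => hpred2 p)]
    rw [ih hts]
    rw [if_pos trivial]
    conv_rhs => rw [List.range_succ_eq_map]
    simp only [List.map_cons, List.map_map, List.length_cons]
    congr 1
    apply List.map_congr_left
    intro g hg
    simp only [Function.comp]
    show (t.length + pvPos ts g) + 1 = pvPos (t :: ts) (g + 1)
    unfold pvPos
    rw [List.take_succ_cons, List.map_cons, List.sum_cons]
    omega

-- range'/filter bridge
theorem pvRange_filter_ge : ∀ (n a : Nat),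
    (List.range n).filter (fun x => decide (a ≤ x)) = List.range' a (n - a) := by
  intro n
  induction n with
  | zero => intro a; simp
  | succ n ih =>
    intro a
    rw [List.range_succ, List.filter_append]
    rw [ih a]
    by_cases ha : a ≤ n
    · have h1 : List.filter (fun x => decide (a ≤ x)) [n] = [n] := by simp [ha]
      rw [h1, show n + 1 - a = (n - a) + 1 from by omega, List.range'_concat]
      congr 1
      simp
      omega
    · have h1 : List.filter (fun x => decide (a ≤ x)) [n] = [] := by simp; omega
      rw [h1, show n + 1 - a = 0 from by omega, show n - a = 0 from by omega]
      rfl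


-- ---------- more slice/encoding identities ----------
theorem pvPos_ge_self (us : List (List Char)) (k : Nat) : k ≤ pvPos us k := by
  unfold pvPos; omega

theorem pvE_slice_seg (ts : List (List Char)) (g g' : Nat) (hg : g ≤ g') (hg' : g' ≤ ts.length) :
    PySem.List.slice (pvE ts) (some (pvPos ts g : Int)) (some ((pvPos ts g' : Int) + 1)) =
      pvE ((ts.drop g).take (g' - g)) := by
  rw [show ((pvPos ts g' : Int) + 1) = ((pvPos ts g' + 1 : Nat) : Int) from by push_cast; ring,
    PySem.List.slice_natCast]
  rcases pvE_split ts g (le_trans hg hg') with ⟨q, h1, h2, _⟩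
  rw [h1, List.drop_left' h2]
  rcases pvE_split (ts.drop g) (g' - g) (by rw [List.length_drop]; omega) with ⟨q2, h1', h2', h3'⟩
  have hself := pvPos_ge_self (ts.drop g) (g' - g)
  have hpos : pvPos ts g' = pvPos ts g + pvPos (ts.drop g) (g' - g) := by
    have hadd := pvPos_add ts g (g' - g)
    rw [show g + (g' - g) = g' from by omega] at hadd
    omega
  have hval : pvPos ts g' + 1 - pvPos ts g = q2.length + 1 := by
    rw [h2']
    omega
  rw [hval, h1', List.take_append, List.take_of_length_le (by omega),
    show q2.length + 1 - q2.length = 1 from by omega]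
  have h4 : List.take 1 (pvE ((ts.drop g).drop (g' - g))) = ['_'] := rfl
  rw [h4]
  exact h3'.symm

theorem pvE_rem (ts : List (List Char)) (g g' : Nat) (hg : g ≤ ts.length) (hg' : g' ≤ ts.length) :
    (pvE ts).take (pvPos ts g) ++ (pvE ts).drop (pvPos ts g') = pvE (ts.take g ++ ts.drop g') := by
  rcases pvE_split ts g hg with ⟨q, h1, h2, h3⟩
  rcases pvE_split ts g' hg' with ⟨q', h1', h2', h3'⟩
  have htake : (pvE ts).take (pvPos ts g) = q := by rw [h1, List.take_left' h2]
  have hdrop : (pvE ts).drop (pvPos ts g') = pvE (ts.drop g') := by rw [h1', List.drop_left' h2']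
  rw [htake, hdrop]
  show q ++ pvE (ts.drop g') = pvE (ts.take g ++ ts.drop g')
  have h5 : pvE (ts.take g ++ ts.drop g') =
      ('_' :: (ts.take g).flatMap pvTok) ++ (ts.drop g').flatMap pvTok := by
    unfold pvE
    rw [List.flatMap_append]
    rfl
  rw [h5, show ('_' :: (ts.take g).flatMap pvTok) = pvE (ts.take g) from rfl, h3]
  show q ++ pvE (ts.drop g') = (q ++ ['_']) ++ (ts.drop g').flatMap pvTok
  unfold pvE
  simp

theorem pvFB_le : ∀ (f : Nat) (t : List Int), pvFB f t ≤ (t.length : Int) := by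
  intro f t
  cases f with
  | zero =>
    show (0 : Int) ≤ _
    exact_mod_cast Int.natCast_nonneg t.length
  | succ f =>
    rw [pvFB]
    by_cases hnil : t = []
    · rw [if_pos hnil]
      subst hnil
      simp
    · rw [if_neg hnil, ← PySem.List.len_eq]
      apply pvFoldLe
      intro a i
      apply pvFoldLe
      intro a j
      simp only []
      split
      · exact min_le_left _ _
      · exact le_refl a

theorem pvMapPal (l : List Int) :
    l.map PySem.Int.toChars = (l.map PySem.Int.toChars).reverse ↔ l = l.reverse := by
  rw [← List.map_reverse]
  exact ⟨fun h => List.map_injective_iff.mpr pvToChars_inj h, fun h => by rw [← h]⟩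

-- the '_' positions inside the inner loop's index range
theorem pvInner_list (ts : List (List Char)) (hfree : ∀ t ∈ ts, '_' ∉ t)
    (hne : ∀ t ∈ ts, t ≠ []) (g : Nat) (hg : g < ts.length) :
    (List.range' (pvPos ts g + 2) ((pvE ts).length - (pvPos ts g + 2))).filter
        (fun x => decide ((pvE ts)[x]? = some '_'))
      = List.map (pvPos ts) (List.range' (g + 1) (ts.length - g)) := by
  rw [show List.range' (pvPos ts g + 2) ((pvE ts).length - (pvPos ts g + 2)) =
      (List.range (pvE ts).length).filter (fun x => decide (pvPos ts g + 2 ≤ x)) from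
    (pvRange_filter_ge _ _).symm]
  rw [List.filter_comm, pvFilter_und ts hfree, List.filter_map]
  have h2 : (List.range (ts.length + 1)).filter ((fun x => decide (pvPos ts g + 2 ≤ x)) ∘ pvPos ts) =
      (List.range (ts.length + 1)).filter (fun g' => decide (g + 1 ≤ g')) := by
    apply List.filter_congr
    intro g' hg'
    have hg'' : g' ≤ ts.length := by have := List.mem_range.mp hg'; omega
    simp only [Function.comp, decide_eq_decide]
    constructor
    · intro hle
      by_contra hlt
      have hle2 : g' ≤ g := by omega
      have := pvPos_mono ts hle2
      omega
    · intro hle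
      exact pvPos_gap ts hne (by omega) hg''
  rw [h2, pvRange_filter_ge, show ts.length + 1 - (g + 1) = ts.length - g from by omega]

-- the canonical nested fold both sides reduce to
def pvNest (xs : List Int) (f : Nat) (init : Int) : Int :=
  (List.range xs.length).foldl (fun a g =>
    (List.range' g (xs.length - g)).foldl (fun a j =>
      if (xs.drop g).take (j + 1 - g) = ((xs.drop g).take (j + 1 - g)).reverse then
        min a (1 + pvFB f (xs.take g ++ xs.drop (j + 1)))
      else a) a) init

theorem pvNest_H1 (xs : List Int) (f : Nat) :
    ∀ (a : Int) (g : Nat), (List.range' g (xs.length - g)).foldl (fun a j =>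
      if (xs.drop g).take (j + 1 - g) = ((xs.drop g).take (j + 1 - g)).reverse then
        min a (1 + pvFB f (xs.take g ++ xs.drop (j + 1)))
      else a) a ≤ a := by
  intro a g
  apply pvFoldLe
  intro a j
  split
  · exact min_le_left _ _
  · exact le_refl a

theorem pvNest_H2 (xs : List Int) (f : Nat) :
    ∀ (x y : Int) (g : Nat), (List.range' g (xs.length - g)).foldl (fun a j =>
      if (xs.drop g).take (j + 1 - g) = ((xs.drop g).take (j + 1 - g)).reverse then
        min a (1 + pvFB f (xs.take g ++ xs.drop (j + 1)))
      else a) (min x y) = min x ((List.range' g (xs.length - g)).foldl (fun a j =>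
      if (xs.drop g).take (j + 1 - g) = ((xs.drop g).take (j + 1 - g)).reverse then
        min a (1 + pvFB f (xs.take g ++ xs.drop (j + 1)))
      else a) y) := by
  intro x y g
  apply pvFoldMin
  intro x' y' p
  split
  · rw [min_assoc]
  · rfl

theorem pvNest_min (xs : List Int) (f : Nat) (x y : Int) :
    pvNest xs f (min x y) = min x (pvNest xs f y) := by
  unfold pvNest
  exact pvFoldMin _ (fun x' y' g => pvNest_H2 xs f x' y' g) _ x y

theorem pvNest_cand (xs : List Int) (f : Nat) (hnil : xs ≠ []) (init : Int) :
    pvNest xs f init ≤ (xs.length : Int) := by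
  rcases List.exists_cons_of_ne_nil hnil with ⟨x0, xt, hx⟩
  unfold pvNest
  apply pvFoldThrough _ (fun a g => pvNest_H1 xs f a g) 0 _ _ _ _
    (List.mem_range.mpr (by rw [hx]; simp))
  intro a
  have hcand : ((xs.drop 0).take (0 + 1 - 0)) = ((xs.drop 0).take (0 + 1 - 0)).reverse := by
    rw [hx]
    rfl
  apply le_trans (pvFoldThrough _ (by
      intro a j
      split
      · exact min_le_left _ _
      · exact le_refl a) 0 (1 + pvFB f (xs.take 0 ++ xs.drop 1)) (by
      intro a'
      rw [if_pos hcand]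
      exact min_le_right _ _) _ a (List.mem_range'_1.mpr (by rw [hx]; simp)))
  have := pvFB_le f (xs.take 0 ++ xs.drop 1)
  have hlen : ((xs.take 0 ++ xs.drop 1).length : Int) = (xs.length : Int) - 1 := by
    rw [hx]
    simp
  omega


theorem pvT3_nil (fa fb : Nat) (hfa : 0 < fa) (hfb : 0 < fb) :
    pvFA fa (pvE (([] : List Int).map PySem.Int.toChars)) = pvFB fb ([] : List Int) := by
  cases fa with
  | zero => omega
  | succ fa =>
    cases fb with
    | zero => omega
    | succ fb => simp [pvFA, pvFB, pvE]

theorem pvT3 : ∀ (N : Nat) (xs : List Int) (fa fb : Nat), xs.length ≤ N →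
    (pvE (xs.map PySem.Int.toChars)).length < fa → xs.length < fb →
    pvFA fa (pvE (xs.map PySem.Int.toChars)) = pvFB fb xs := by
  intro N
  induction N with
  | zero =>
    intro xs fa fb hN hfa hfb
    have hnil : xs = [] := List.eq_nil_of_length_eq_zero (Nat.le_zero.mp hN)
    subst hnil
    exact pvT3_nil fa fb (by simp [pvE] at hfa; omega) (by omega)
  | succ N ih =>
    intro xs fa fb hN hfa hfb
    by_cases hnil : xs = []
    · subst hnil
      exact pvT3_nil fa fb (by simp [pvE] at hfa; omega) (by omega)
    · have hfree : ∀ t ∈ xs.map PySem.Int.toChars, '_' ∉ t := by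
        intro t ht
        rcases List.mem_map.mp ht with ⟨x, _, rfl⟩
        intro hc
        exact pvToChars_no_underscore x '_' hc rfl
      have hne : ∀ t ∈ xs.map PySem.Int.toChars, t ≠ [] := by
        intro t ht
        rcases List.mem_map.mp ht with ⟨x, _, rfl⟩
        exact pvToChars_ne_nil x
      have hL : (xs.map PySem.Int.toChars).length = xs.length := List.length_map _
      have hxs1 : 1 ≤ xs.length := List.length_pos_of_ne_nil hnil
      have hslen := pvE_len (xs.map PySem.Int.toChars)
      have hpself := pvPos_ge_self (xs.map PySem.Int.toChars) (xs.map PySem.Int.toChars).length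
      rw [hL] at hslen hpself
      have hsne : pvE (xs.map PySem.Int.toChars) ≠ ['_'] := by
        intro hEq
        have hlen1 := congrArg List.length hEq
        rw [hslen] at hlen1
        simp at hlen1
        omega
      cases fa with
      | zero => omega
      | succ fA =>
        cases fb with
        | zero => omega
        | succ fB =>
          have hA : pvFA (fA + 1) (pvE (xs.map PySem.Int.toChars)) =
              pvNest xs fB (((pvE (xs.map PySem.Int.toChars)).length : Int)) := by
            rw [pvFA, if_neg hsne, PySem.List.len_eq]
            simp only [ne_eq, ite_not]
            rw [PySem.List.foldl_ite_eq_foldl_filter]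
            rw [pvFilter_und _ hfree, List.foldl_map, hL]
            rw [List.range_succ, List.foldl_append]
            simp only [List.foldl_cons, List.foldl_nil]
            have hc0 : (pvE (xs.map PySem.Int.toChars)).length -
                (pvPos (xs.map PySem.Int.toChars) xs.length + 2) = 0 := by
              rw [hslen]
              omega
            rw [hc0, List.range'_zero]
            simp only [List.foldl_nil]
            unfold pvNest
            apply PySem.List.foldl_congr_mem
            intro a g hg
            have hgL : g < xs.length := List.mem_range.mp hg
            rw [PySem.List.foldl_ite_eq_foldl_filter]
            rw [pvInner_list (xs.map PySem.Int.toChars) hfree hne g (by omega), hL]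
            rw [List.foldl_map]
            rw [show g + 1 = 1 + g from by omega]
            rw [← List.map_add_range' g (xs.length - g) 1, List.foldl_map]
            apply PySem.List.foldl_congr_mem
            intro a j hj
            have hjr := List.mem_range'_1.mp hj
            have hgle : g ≤ 1 + j := by omega
            have hjle : 1 + j ≤ (xs.map PySem.Int.toChars).length := by omega
            rw [pvE_slice_seg (xs.map PySem.Int.toChars) g (1 + j) hgle hjle]
            have hseg : ((xs.map PySem.Int.toChars).drop g).take ((1 + j) - g) =
                ((xs.drop g).take ((1 + j) - g)).map PySem.Int.toChars := by
              rw [List.map_take, List.map_drop]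
            have hsegfree : ∀ t ∈ ((xs.map PySem.Int.toChars).drop g).take ((1 + j) - g), '_' ∉ t := by
              intro t ht
              exact hfree t (List.mem_of_mem_drop (List.mem_of_mem_take ht))
            by_cases hpal : (xs.drop g).take (j + 1 - g) = ((xs.drop g).take (j + 1 - g)).reverse
            · have hpalT : pvIsPalinA (pvE (((xs.map PySem.Int.toChars).drop g).take ((1 + j) - g))) = true := by
                rw [pvIsPalinA_E_iff _ hsegfree, hseg,
                  show (1 + j) - g = j + 1 - g from by omega, ← List.map_reverse, ← hpal]
              rw [if_pos hpalT, if_pos hpal]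
              rw [pvSlice_to, pvSlice_from]
              rw [pvE_rem (xs.map PySem.Int.toChars) g (1 + j) (by omega) hjle]
              have hremT : (xs.map PySem.Int.toChars).take g ++ (xs.map PySem.Int.toChars).drop (1 + j) =
                  (xs.take g ++ xs.drop (1 + j)).map PySem.Int.toChars := by
                rw [List.map_append, List.map_take, List.map_drop]
              rw [hremT]
              have hlen1 : (xs.take g ++ xs.drop (1 + j)).length ≤ N := by
                rw [List.length_append, List.length_take, List.length_drop]
                omega
              have hlen2 : (pvE ((xs.take g ++ xs.drop (1 + j)).map PySem.Int.toChars)).length < fA := by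
                rw [← hremT]
                have hrem := congrArg List.length
                  (pvE_rem (xs.map PySem.Int.toChars) g (1 + j) (by omega) hjle)
                rw [List.length_append, List.length_take, List.length_drop] at hrem
                have hposg : pvPos (xs.map PySem.Int.toChars) g ≤
                    pvPos (xs.map PySem.Int.toChars) xs.length :=
                  pvPos_mono _ (by omega)
                have hgap : pvPos (xs.map PySem.Int.toChars) g + 2 ≤
                    pvPos (xs.map PySem.Int.toChars) (1 + j) :=
                  pvPos_gap _ hne (by omega) hjle
                have hposj : pvPos (xs.map PySem.Int.toChars) (1 + j) ≤
                    pvPos (xs.map PySem.Int.toChars) xs.length :=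
                  pvPos_mono _ (by omega)
                omega
              have hlen4 : (xs.take g ++ xs.drop (1 + j)).length < fB := by
                rw [List.length_append, List.length_take, List.length_drop]
                omega
              rw [ih _ fA fB hlen1 hlen2 hlen4]
              rw [show 1 + j = j + 1 from by omega]
              rw [min_comm, Int.add_comm]
            · have hpalT : ¬ (pvIsPalinA (pvE (((xs.map PySem.Int.toChars).drop g).take ((1 + j) - g))) = true) := by
                rw [pvIsPalinA_E_iff _ hsegfree, hseg,
                  show (1 + j) - g = j + 1 - g from by omega]
                intro hc
                exact hpal ((pvMapPal _).mp hc)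
              rw [if_neg hpalT, if_neg hpal]
          have hB : pvFB (fB + 1) xs = pvNest xs fB ((xs.length : Int)) := by
            rw [pvFB, if_neg hnil, PySem.List.len_eq]
            unfold pvNest
            simp only [pvSlice_seg, pvSlice_to, pvSlice_from']
          rw [hA, hB]
          have h1 : ((xs.length : Int)) ≤ (((pvE (xs.map PySem.Int.toChars)).length : Int)) := by
            rw [hslen]
            push_cast
            omega
          have h2 := pvNest_cand xs fB hnil (((pvE (xs.map PySem.Int.toChars)).length : Int))
          have h3 := pvNest_min xs fB ((xs.length : Int)) (((pvE (xs.map PySem.Int.toChars)).length : Int))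
          rw [min_eq_left h1] at h3
          rw [h3]
          exact (min_eq_right h2).symm


theorem pvJoin_E : ∀ (ts : List (List Char)), ts ≠ [] →
    ['_'] ++ PySem.Chars.join ['_'] ts ++ ['_'] = pvE ts := by
  intro ts
  induction ts with
  | nil => intro h; exact absurd rfl h
  | cons t ts ih =>
    intro _
    cases ts with
    | nil =>
      rw [PySem.Chars.join_singleton]
      simp [pvE, pvTok]
    | cons t2 ts2 =>
      rw [PySem.Chars.join_cons_cons, pvE_cons, ← ih (List.cons_ne_nil t2 ts2)]
      simp


-- ======================================================================
-- ---------- B side: BFS over states computes the pure companion -------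
-- ======================================================================

-- one legal move: remove the palindromic segment [i..j]
def pvMove (t u : List Int) : Prop :=
  ∃ i j : Nat, i ≤ j ∧ j < t.length ∧
    (t.drop i).take (j + 1 - i) = ((t.drop i).take (j + 1 - i)).reverse ∧
    u = t.take i ++ t.drop (j + 1)

theorem pvMove_ne_nil {t u : List Int} (h : pvMove t u) : t ≠ [] := by
  obtain ⟨i, j, _, hj, _, _⟩ := h
  intro hnil
  subst hnil
  simp at hj

theorem pvMove_length {t u : List Int} (h : pvMove t u) : u.length < t.length := by
  obtain ⟨i, j, hij, hj, _, hu⟩ := h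
  subst hu
  simp only [List.length_append, List.length_take, List.length_drop]
  omega

theorem pvCanonB_nil : pvCanonB [] = 0 := by
  simp [pvCanonB, pvFB]

theorem pvFB_nonneg : ∀ (fuel : Nat) (t : List Int), 0 ≤ pvFB fuel t := by
  intro fuel
  induction fuel with
  | zero => intro t; exact le_refl 0
  | succ f ih =>
    intro t
    rw [pvFB]
    by_cases hnil : t = []
    · rw [if_pos hnil]
    · rw [if_neg hnil]
      apply pvFoldLB _ 0
      · intro a i _ ha
        apply pvFoldLB _ 0
        · intro a j _ ha
          simp only []
          split
          · exact le_min ha (by have := ih (PySem.List.slice t none (some (i : Int)) ++ PySem.List.slice t (some ((j : Int) + 1)) none); omega)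
          · exact ha
        · exact ha
      · rw [PySem.List.len_eq]
        exact_mod_cast Int.natCast_nonneg t.length

theorem pvCanonB_nonneg (t : List Int) : 0 ≤ pvCanonB t := pvFB_nonneg _ _

theorem pvCanonB_le_len (t : List Int) : pvCanonB t ≤ (t.length : Int) := pvFB_le _ _

-- the defining fold of pvCanonB, with the slices normalised to take/drop and the
-- recursive pvFB values replaced by pvCanonB
theorem pvCanonB_eq_nest (t : List Int) (ht : t ≠ []) :
    pvCanonB t = (List.range t.length).foldl (fun a (i : Nat) =>
      (List.range' i (t.length - i)).foldl (fun a (j : Nat) =>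
        if (t.drop i).take (j + 1 - i) = ((t.drop i).take (j + 1 - i)).reverse then
          min a (1 + pvCanonB (t.take i ++ t.drop (j + 1)))
        else a) a) ((t.length : Int)) := by
  unfold pvCanonB
  rw [pvFB, if_neg ht, PySem.List.len_eq]
  apply PySem.List.foldl_congr_mem
  intro a i hi
  have hi' : i < t.length := List.mem_range.mp hi
  apply PySem.List.foldl_congr_mem
  intro a j hj
  have hj' : i ≤ j ∧ j < t.length := by
    have := List.mem_range'_1.mp hj
    omega
  simp only [pvSlice_seg, pvSlice_to, pvSlice_from']
  by_cases hpal : (t.drop i).take (j + 1 - i) = ((t.drop i).take (j + 1 - i)).reverse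
  · rw [if_pos hpal, if_pos hpal]
    have hlen : (t.take i ++ t.drop (j + 1)).length < t.length := by
      simp only [List.length_append, List.length_take, List.length_drop]
      omega
    rw [pvFB_fuel (t.take i ++ t.drop (j + 1)).length _ (le_refl _) t.length
      ((t.take i ++ t.drop (j + 1)).length + 1) (by omega) (Nat.lt_succ_self _)]
  · rw [if_neg hpal, if_neg hpal]

theorem pvF_le_iff (t : List Int) (ht : t ≠ []) (k : Int) :
    pvCanonB t ≤ k ↔ ((t.length : Int) ≤ k ∨ ∃ u, pvMove t u ∧ pvCanonB u + 1 ≤ k) := by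
  rw [pvCanonB_eq_nest t ht]
  constructor
  · intro hle
    by_contra hcon
    push_neg at hcon
    obtain ⟨hlen, hmv⟩ := hcon
    have hw : k + 1 ≤ (List.range t.length).foldl (fun a (i : Nat) =>
        (List.range' i (t.length - i)).foldl (fun a (j : Nat) =>
          if (t.drop i).take (j + 1 - i) = ((t.drop i).take (j + 1 - i)).reverse then
            min a (1 + pvCanonB (t.take i ++ t.drop (j + 1)))
          else a) a) ((t.length : Int)) := by
      apply pvFoldLB _ (k + 1)
      · intro a i hi ha
        have hi' : i < t.length := List.mem_range.mp hi
        apply pvFoldLB _ (k + 1)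
        · intro a j hj ha
          have hj' : i ≤ j ∧ j < t.length := by
            have := List.mem_range'_1.mp hj
            omega
          split
          · rename_i hpal
            refine le_min ha ?_
            have := hmv (t.take i ++ t.drop (j + 1)) ⟨i, j, hj'.1, hj'.2, hpal, rfl⟩
            omega
          · exact ha
        · exact ha
      · omega
    omega
  · intro h
    rcases h with hlen | ⟨u, ⟨i, j, hij, hjlen, hpal, hu⟩, hle⟩
    · refine le_trans ?_ hlen
      apply pvFoldLe
      intro a i
      apply pvFoldLe
      intro a j
      split
      · exact min_le_left _ _
      · exact le_refl a
    · apply pvFoldThrough _ ?_ i k ?_ _ _ (List.mem_range.mpr (by omega))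
      · intro a i'
        apply pvFoldLe
        intro a j'
        split
        · exact min_le_left _ _
        · exact le_refl a
      · intro a
        apply pvFoldThrough _ ?_ j k ?_ _ _ (List.mem_range'_1.mpr (by omega))
        · intro a j'
          split
          · exact min_le_left _ _
          · exact le_refl a
        · intro a'
          rw [if_pos hpal, ← hu]
          refine le_trans (min_le_right _ _) ?_
          omega

theorem pvF_succ_iff (t : List Int) (ht : t ≠ []) (k : Int) :
    pvCanonB t ≤ k + 1 ↔ ∃ u, pvMove t u ∧ pvCanonB u ≤ k := by
  rw [pvF_le_iff t ht]
  constructor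
  · intro h
    rcases h with hlen | ⟨u, hmv, hle⟩
    · rcases List.exists_cons_of_ne_nil ht with ⟨a, rest, rfl⟩
      refine ⟨rest, ⟨0, 0, le_refl 0, by simp, by simp, by simp⟩, ?_⟩
      have := pvCanonB_le_len rest
      simp only [List.length_cons] at hlen
      push_cast at hlen ⊢
      omega
    · exact ⟨u, hmv, by omega⟩
  · rintro ⟨u, hmv, hle⟩
    exact Or.inr ⟨u, hmv, by omega⟩

theorem pvMove_f_le {t u : List Int} (h : pvMove t u) : pvCanonB t ≤ pvCanonB u + 1 :=
  (pvF_le_iff t (pvMove_ne_nil h) _).mpr (Or.inr ⟨u, h, le_refl _⟩)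

-- paths of moves
def pvReach : Nat → List Int → List Int → Prop
  | 0, t, u => t = u
  | n + 1, t, u => ∃ v, pvMove t v ∧ pvReach n v u

theorem pvReach_snoc : ∀ (n : Nat) (t v u : List Int),
    pvReach n t v → pvMove v u → pvReach (n + 1) t u := by
  intro n
  induction n with
  | zero =>
    intro t v u h hm
    exact ⟨u, h ▸ hm, rfl⟩
  | succ n ih =>
    intro t v u h hm
    obtain ⟨w, hw, hr⟩ := h
    exact ⟨w, hw, ih w v u hr hm⟩

theorem pvReach_unsnoc : ∀ (n : Nat) (t u : List Int),
    pvReach (n + 1) t u → ∃ v, pvReach n t v ∧ pvMove v u := by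
  intro n
  induction n with
  | zero =>
    intro t u h
    obtain ⟨v, hm, hr⟩ := h
    exact ⟨t, rfl, hr ▸ hm⟩
  | succ n ih =>
    intro t u h
    obtain ⟨w, hw, hr⟩ := h
    obtain ⟨v, hrv, hmv⟩ := ih w u hr
    exact ⟨v, ⟨w, hw, hrv⟩, hmv⟩

theorem pvReach_ge : ∀ (n : Nat) (t : List Int), pvReach n t [] → pvCanonB t ≤ (n : Int) := by
  intro n
  induction n with
  | zero =>
    intro t h
    have : t = [] := h
    subst this
    rw [pvCanonB_nil]
    simp
  | succ n ih =>
    intro t h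
    obtain ⟨v, hm, hr⟩ := h
    have h1 := pvMove_f_le hm
    have h2 := ih v hr
    push_cast
    omega

theorem pvReach_exact : ∀ (n : Nat) (t : List Int), t.length ≤ n →
    pvReach (pvCanonB t).toNat t [] := by
  intro n
  induction n with
  | zero =>
    intro t ht
    have : t = [] := List.eq_nil_of_length_eq_zero (Nat.le_zero.mp ht)
    subst this
    rw [pvCanonB_nil]
    rfl
  | succ n ih =>
    intro t ht
    by_cases hnil : t = []
    · subst hnil
      rw [pvCanonB_nil]
      rfl
    · have h1 : pvCanonB t ≤ (pvCanonB t - 1) + 1 := by omega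
      obtain ⟨u, hmv, hle⟩ := (pvF_succ_iff t hnil _).mp h1
      have h2 := pvMove_f_le hmv
      have hu0 := pvCanonB_nonneg u
      have hr := ih u (by have := pvMove_length hmv; omega)
      have hstep : pvReach ((pvCanonB u).toNat + 1) t [] := ⟨u, hmv, hr⟩
      rw [show (pvCanonB t).toNat = (pvCanonB u).toNat + 1 from by omega]
      exact hstep

-- the per-candidate step of the BFS level, and the flattened candidate list
def pvConsider (acc : PySem.Set (List Int) × PySem.Set (List Int)) (u : List Int) :
    PySem.Set (List Int) × PySem.Set (List Int) :=
  if PySem.Set.contains acc.2 u then acc else (PySem.Set.add acc.1 u, PySem.Set.add acc.2 u)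

def pvCands (t : List Int) : List (List Int) :=
  (List.range t.length).flatMap (fun i =>
    ((List.range' i (t.length - i)).filter (fun j =>
        decide ((t.drop i).take (j + 1 - i) = ((t.drop i).take (j + 1 - i)).reverse))).map
      (fun j => t.take i ++ t.drop (j + 1)))

theorem pvMem_cands (t u : List Int) : u ∈ pvCands t ↔ pvMove t u := by
  unfold pvCands pvMove
  simp only [List.mem_flatMap, List.mem_map, List.mem_filter, List.mem_range, List.mem_range'_1,
    decide_eq_true_eq]
  constructor
  · rintro ⟨i, hi, j, ⟨⟨hij, hjr⟩, hpal⟩, hu⟩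
    exact ⟨i, j, hij, by omega, hpal, hu.symm⟩
  · rintro ⟨i, j, hij, hj, hpal, hu⟩
    exact ⟨i, by omega, j, ⟨⟨hij, by omega⟩, hpal⟩, hu.symm⟩

theorem pvLevel_eq (frontier seen : PySem.Set (List Int)) :
    pvLevel frontier seen = (frontier.flatMap pvCands).foldl pvConsider (PySem.Set.empty, seen) := by
  unfold pvLevel
  rw [← pvFoldlFoldl pvConsider pvCands]
  have hfun : (fun (acc : PySem.Set (List Int) × PySem.Set (List Int)) (t : List Int) =>
      (List.range t.length).foldl (fun acc (i : Nat) =>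
        (List.range' i (t.length - i)).foldl (fun acc (j : Nat) =>
          let seg := PySem.List.slice t (some (i : Int)) (some ((j : Int) + 1))
          if seg = seg.reverse then
            let u := PySem.List.slice t none (some (i : Int)) ++
                     PySem.List.slice t (some ((j : Int) + 1)) none
            if PySem.Set.contains acc.2 u then acc
            else (PySem.Set.add acc.1 u, PySem.Set.add acc.2 u)
          else acc) acc) acc)
      = (fun acc t => (pvCands t).foldl pvConsider acc) := by
    funext acc t
    unfold pvCands
    rw [← pvFoldlFoldl pvConsider]
    apply PySem.List.foldl_congr_mem
    intro a i _
    rw [List.foldl_map,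
      ← PySem.List.foldl_ite_eq_foldl_filter
        (fun j => (t.drop i).take (j + 1 - i) = ((t.drop i).take (j + 1 - i)).reverse)
        (fun acc j => pvConsider acc (t.take i ++ t.drop (j + 1)))]
    apply PySem.List.foldl_congr_mem
    intro a' j _
    simp only [pvSlice_seg, pvSlice_to, pvSlice_from', pvConsider]
  rw [hfun]

theorem pvConsider_fold (S0 : PySem.Set (List Int)) :
    ∀ (cs : List (List Int)) (nxt seen : PySem.Set (List Int)),
      (∀ u, u ∈ seen ↔ u ∈ S0 ∨ u ∈ nxt) →
      (∀ u, u ∈ (cs.foldl pvConsider (nxt, seen)).1 ↔ u ∈ nxt ∨ (u ∈ cs ∧ u ∉ S0)) ∧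
      (∀ u, u ∈ (cs.foldl pvConsider (nxt, seen)).2 ↔ u ∈ S0 ∨ u ∈ (cs.foldl pvConsider (nxt, seen)).1) := by
  intro cs
  induction cs with
  | nil =>
    intro nxt seen hseen
    refine ⟨fun u => by simp, fun u => ?_⟩
    simp only [List.foldl_nil]
    exact hseen u
  | cons c cs ih =>
    intro nxt seen hseen
    simp only [List.foldl_cons]
    by_cases hc : PySem.Set.contains seen c = true
    · have hcmem : c ∈ S0 ∨ c ∈ nxt := (hseen c).mp ((PySem.Set.contains_iff _ _).mp hc)
      rw [show pvConsider (nxt, seen) c = (nxt, seen) from by unfold pvConsider; rw [if_pos hc]]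
      have h := ih nxt seen hseen
      refine ⟨fun u => ?_, h.2⟩
      rw [h.1 u, List.mem_cons]
      by_cases huc : u = c
      · subst huc
        tauto
      · tauto
    · have hcns : ¬ (c ∈ S0 ∨ c ∈ nxt) := by
        intro h
        exact hc ((PySem.Set.contains_iff _ _).mpr ((hseen c).mpr h))
      push_neg at hcns
      rw [show pvConsider (nxt, seen) c = (PySem.Set.add nxt c, PySem.Set.add seen c) from by
        unfold pvConsider; rw [if_neg hc]]
      have hseen' : ∀ u, u ∈ PySem.Set.add seen c ↔ u ∈ S0 ∨ u ∈ PySem.Set.add nxt c := by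
        intro u
        rw [PySem.Set.mem_add, PySem.Set.mem_add, hseen u]
        tauto
      have h := ih (PySem.Set.add nxt c) (PySem.Set.add seen c) hseen'
      refine ⟨fun u => ?_, h.2⟩
      rw [h.1 u, PySem.Set.mem_add, List.mem_cons]
      by_cases huc : u = c
      · subst huc
        tauto
      · tauto

theorem pvLevel_spec (frontier seen : PySem.Set (List Int)) :
    (∀ u, u ∈ (pvLevel frontier seen).1 ↔ (∃ t ∈ frontier, pvMove t u) ∧ u ∉ seen) ∧
    (∀ u, u ∈ (pvLevel frontier seen).2 ↔ u ∈ seen ∨ u ∈ (pvLevel frontier seen).1) := by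
  rw [pvLevel_eq]
  have h := pvConsider_fold seen (frontier.flatMap pvCands) PySem.Set.empty seen
    (by intro u; simp [PySem.Set.empty])
  refine ⟨fun u => ?_, h.2⟩
  rw [h.1 u]
  simp only [PySem.Set.empty, List.not_mem_nil, false_or, List.mem_flatMap]
  constructor
  · rintro ⟨⟨t, ht, hu⟩, hns⟩
    exact ⟨⟨t, ht, (pvMem_cands t u).mp hu⟩, hns⟩
  · rintro ⟨⟨t, ht, hmv⟩, hns⟩
    exact ⟨⟨t, ht, (pvMem_cands t u).mpr hmv⟩, hns⟩

-- BFS invariant after m levels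
def pvInv (arr : List Int) (m : Nat) (frontier seen : PySem.Set (List Int)) : Prop :=
  (∀ u, u ∈ seen ↔ ∃ m' ≤ m, pvReach m' arr u) ∧
  (∀ u, u ∈ frontier ↔ (pvReach m arr u ∧ ∀ m' < m, ¬ pvReach m' arr u))

theorem pvInv_step (arr : List Int) (m : Nat) (F S : PySem.Set (List Int))
    (h : pvInv arr m F S) : pvInv arr (m + 1) (pvLevel F S).1 (pvLevel F S).2 := by
  obtain ⟨hS, hF⟩ := h
  have hL := pvLevel_spec F S
  have hfr : ∀ u, u ∈ (pvLevel F S).1 ↔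
      (pvReach (m + 1) arr u ∧ ∀ m' < m + 1, ¬ pvReach m' arr u) := by
    intro u
    rw [hL.1 u]
    constructor
    · rintro ⟨⟨t, htF, hmv⟩, hus⟩
      have ht := (hF t).mp htF
      refine ⟨pvReach_snoc m arr t u ht.1 hmv, ?_⟩
      intro m' hm' hr
      exact hus ((hS u).mpr ⟨m', by omega, hr⟩)
    · rintro ⟨hr, hmin⟩
      obtain ⟨t, hrt, hmv⟩ := pvReach_unsnoc m arr u hr
      by_cases hex : ∃ m', m' < m ∧ pvReach m' arr t
      · obtain ⟨m', hm', hrt'⟩ := hex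
        exact absurd (pvReach_snoc m' arr t u hrt' hmv) (hmin (m' + 1) (by omega))
      · push_neg at hex
        refine ⟨⟨t, (hF t).mpr ⟨hrt, fun m' hm' => hex m' hm'⟩, hmv⟩, ?_⟩
        intro hus
        obtain ⟨m', hm', hr'⟩ := (hS u).mp hus
        exact hmin m' (by omega) hr'
  refine ⟨?_, hfr⟩
  intro u
  rw [hL.2 u, hS u, hfr u]
  constructor
  · rintro (⟨m', hm', hr⟩ | ⟨hr, _⟩)
    · exact ⟨m', by omega, hr⟩
    · exact ⟨m + 1, le_refl _, hr⟩
  · rintro ⟨m', hm', hr⟩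
    by_cases hle : m' ≤ m
    · exact Or.inl ⟨m', hle, hr⟩
    · have hm'' : m' = m + 1 := by omega
      subst hm''
      by_cases hex : ∃ m'', m'' ≤ m ∧ pvReach m'' arr u
      · obtain ⟨m'', h1, h2⟩ := hex
        exact Or.inl ⟨m'', h1, h2⟩
      · push_neg at hex
        exact Or.inr ⟨hr, fun k hk hrk => hex k (by omega) hrk⟩

theorem pvBFS_run (arr : List Int) (N : Nat)
    (hRN : pvReach N arr []) (hmin : ∀ m' : Nat, pvReach m' arr [] → N ≤ m') :
    ∀ (fuel m : Nat) (F S : PySem.Set (List Int)), pvInv arr m F S → m ≤ N → N - m < fuel →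
      pvBFS fuel F S ((m : Nat) : Int) = ((N : Nat) : Int) := by
  intro fuel
  induction fuel with
  | zero => intro m F S _ _ h; omega
  | succ f ih =>
    intro m F S hInv hmN hfuel
    rw [pvBFS]
    by_cases hc : PySem.Set.contains F [] = true
    · rw [if_pos hc]
      have h0 := (hInv.2 []).mp ((PySem.Set.contains_iff _ _).mp hc)
      have h1 := hmin m h0.1
      have : m = N := by omega
      exact_mod_cast congrArg (Nat.cast : Nat → Int) this
    · rw [if_neg hc]
      have hmltN : m < N := by
        rcases Nat.lt_or_ge m N with h | h
        · exact h
        · exfalso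
          have hmN' : m = N := by omega
          subst hmN'
          have hmem : [] ∈ F := (hInv.2 []).mpr
            ⟨hRN, fun m' hm' hr => absurd (hmin m' hr) (by omega)⟩
          exact hc ((PySem.Set.contains_iff _ _).mpr hmem)
      have hstep := pvInv_step arr m F S hInv
      have hrec := ih (m + 1) (pvLevel F S).1 (pvLevel F S).2 hstep (by omega) (by omega)
      have hcast : ((m : Nat) : Int) + 1 = (((m + 1 : Nat)) : Int) := by push_cast; ring
      rw [hcast]
      exact hrec

theorem pvB_top (arr : List Int) : minimumMoves2_alt arr = pvCanonB arr := by
  unfold minimumMoves2_alt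
  have h0 : 0 ≤ pvCanonB arr := pvCanonB_nonneg arr
  have hNval : pvCanonB arr = (((pvCanonB arr).toNat : Nat) : Int) := by omega
  have hRN : pvReach (pvCanonB arr).toNat arr [] := pvReach_exact arr.length arr (le_refl _)
  have hmin : ∀ m' : Nat, pvReach m' arr [] → (pvCanonB arr).toNat ≤ m' := by
    intro m' h
    have := pvReach_ge m' arr h
    omega
  have hNlen : (pvCanonB arr).toNat ≤ arr.length := by
    have := pvCanonB_le_len arr
    omega
  have hInv0 : pvInv arr 0 (PySem.Set.ofList [arr]) (PySem.Set.ofList [arr]) := by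
    constructor
    · intro u
      rw [PySem.Set.mem_ofList]
      simp only [List.mem_singleton]
      constructor
      · intro h
        exact ⟨0, le_refl 0, show arr = u from h.symm⟩
      · rintro ⟨m', hm', hr⟩
        have : m' = 0 := by omega
        subst this
        exact (show arr = u from hr).symm
    · intro u
      rw [PySem.Set.mem_ofList]
      simp only [List.mem_singleton]
      constructor
      · intro h
        exact ⟨show arr = u from h.symm, fun m' hm' => by omega⟩
      · rintro ⟨hr, _⟩
        exact (show arr = u from hr).symm
  have hrun := pvBFS_run arr (pvCanonB arr).toNat hRN hmin (arr.length + 1) 0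
    (PySem.Set.ofList [arr]) (PySem.Set.ofList [arr]) hInv0 (by omega) (by omega)
  rw [hNval]
  simpa using hrun


-- ===== VERDICT (by name: the statement is the Claim_ definition above) =====
theorem minimumMoves2_spec : Claim_unchanged_minimumMoves2 := by
  intro arr _
  unfold Spec_minimumMoves2 D_minimumMoves2
  intro hnil
  rw [pvA_top arr, pvB_top arr]
  have hmapne : arr.map PySem.Int.toChars ≠ [] := by
    intro h
    exact hnil (List.map_eq_nil_iff.mp h)
  rw [pvJoin_E _ hmapne]
  unfold pvCanonA pvCanonB
  exact pvT3 arr.length arr _ _ (le_refl _) (Nat.lt_succ_self _) (Nat.lt_succ_self _)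

theorem minimumMoves2_changed : Claim_changed_minimumMoves2 := by
  unfold Claim_changed_minimumMoves2; decide

theorem minimumMoves2_tight : Claim_exact_minimumMoves2 := by
  unfold Claim_exact_minimumMoves2
  intro arr _ h
  unfold D_minimumMoves2 at h
  subst h
  decide
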